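-- pv_equiv track=rewrite | github.com/benquick123/code-profiling | code/batch-1/vse-naloge-brez-testov/DN7-M-77.py | varen_premik
-- ===== SOURCE A (Python) =====
-- def varen_premik(x0, y0, x1, y1, mine):
--     if y0 == y1:
--         if x1>=x0:
--             for x in range(x0, x1+1):
--                 if (x,y0) in mine:
--                     return False
--             return True
--         if x0>x1:
--             for x in range(x0, x1-1,-1):
--                 if (x,y0) in mine:
--                     return False
--             return True
--     if x0 == x1:
--         if y1>=y0:
--             for y in range(y0, y1+1):
--                 if (x0,y) in mine:
--                     return False
--             return True
--         if y0>y1: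
--             for y in range(y0, y1-1,-1):
--                 if (x0,y) in mine:
--                     return False
--             return True
-- ===== SOURCE B (Python) =====
-- def varen_premik(x0, y0, x1, y1, mine):
--     # Traverses the mine collection instead of the segment cells: O(|mine|) not O(L).
--     if y0 == y1:
--         lo, hi = min(x0, x1), max(x0, x1)
--         return all(not (my == y0 and lo <= mx <= hi) for (mx, my) in mine)
--     if x0 == x1:
--         lo, hi = min(y0, y1), max(y0, y1)
--         return all(not (mx == x0 and lo <= my <= hi) for (mx, my) in mine)
-- ===== Notes on version B (the rewrite author's own statement) =====
-- stated objective: alternative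
-- what changed: B scans the mine collection once, testing each mine against the inclusive min/max bounds of the segment, instead of A's walk over every cell of the segment with a membership test per cell; A's four directional branches collapse to two.
-- outside the precondition, e.g. on varen_premik(0, 0, 1, 1, set()): A returns None, B returns None
import Mathlib
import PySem

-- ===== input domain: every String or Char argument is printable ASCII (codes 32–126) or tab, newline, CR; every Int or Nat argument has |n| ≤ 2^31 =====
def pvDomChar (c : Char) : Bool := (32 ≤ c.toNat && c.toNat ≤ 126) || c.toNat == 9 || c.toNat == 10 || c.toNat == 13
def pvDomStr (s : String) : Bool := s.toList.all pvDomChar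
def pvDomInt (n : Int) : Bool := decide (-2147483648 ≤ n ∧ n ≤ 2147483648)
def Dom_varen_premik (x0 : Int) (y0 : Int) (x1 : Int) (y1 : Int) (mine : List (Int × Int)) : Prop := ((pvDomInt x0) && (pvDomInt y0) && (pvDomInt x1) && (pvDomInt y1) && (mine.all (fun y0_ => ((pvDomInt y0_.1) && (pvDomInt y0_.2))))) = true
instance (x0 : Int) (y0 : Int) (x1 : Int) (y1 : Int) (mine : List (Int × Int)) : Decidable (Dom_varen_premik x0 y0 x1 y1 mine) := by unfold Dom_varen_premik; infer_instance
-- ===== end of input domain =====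

-- B scans the mine list once against the inclusive segment bounds instead of walking every
-- cell of the segment; equivalence is proved on axis-aligned moves (on diagonals A returns None, not a bool).

-- ===== PORT A =====
-- Python's `for x in range(a, b[, -1])` with an early `return False` is ported as a lazy loop
-- recursion (one helper per direction), exactly mirroring range's step-by-step traversal and the
-- early return; it never materializes the range.
def pvScanUp (i stop : Int) (key : Int → Int × Int) (mine : List (Int × Int)) : Bool :=
  if i < stop then
    if mine.contains (key i) then false else pvScanUp (i + 1) stop key mine
  else true
termination_by (stop - i).toNat
decreasing_by omega

def pvScanDown (i stop : Int) (key : Int → Int × Int) (mine : List (Int × Int)) : Bool :=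
  if stop < i then
    if mine.contains (key i) then false else pvScanDown (i - 1) stop key mine
  else true
termination_by (i - stop).toNat
decreasing_by omega

def varen_premik (x0 : Int) (y0 : Int) (x1 : Int) (y1 : Int) (mine : List (Int × Int)) : Bool :=
  if y0 = y1 then
    if x1 ≥ x0 then
      pvScanUp x0 (x1 + 1) (fun x => (x, y0)) mine    -- for x in range(x0, x1+1)
    else if x0 > x1 then
      pvScanDown x0 (x1 - 1) (fun x => (x, y0)) mine  -- for x in range(x0, x1-1, -1)
    else false  -- unreachable fall-through (Python would return None; excluded by Pre_)
  else if x0 = x1 then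
    if y1 ≥ y0 then
      pvScanUp y0 (y1 + 1) (fun y => (x0, y)) mine    -- for y in range(y0, y1+1)
    else if y0 > y1 then
      pvScanDown y0 (y1 - 1) (fun y => (x0, y)) mine  -- for y in range(y0, y1-1, -1)
    else false  -- unreachable fall-through
  else false  -- Python returns None here; excluded by Pre_

-- ===== PORT B =====
def varen_premik_alt (x0 : Int) (y0 : Int) (x1 : Int) (y1 : Int) (mine : List (Int × Int)) : Bool :=
  if y0 = y1 then
    mine.all (fun p => !(p.2 == y0 && decide (min x0 x1 ≤ p.1) && decide (p.1 ≤ max x0 x1)))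
  else if x0 = x1 then
    mine.all (fun p => !(p.1 == x0 && decide (min y0 y1 ≤ p.2) && decide (p.2 ≤ max y0 y1)))
  else false  -- Python B returns None here; excluded by Pre_

-- ===== PRECONDITION & SPEC =====
-- Pre_ excludes diagonal moves (x0≠x1 and y0≠y1), on which Python A falls through and returns
-- None, which is not a bool; Python B does the same there.
def Pre_varen_premik (x0 : Int) (y0 : Int) (x1 : Int) (y1 : Int) (mine : List (Int × Int)) : Prop :=
  y0 = y1 ∨ x0 = x1
instance (x0 : Int) (y0 : Int) (x1 : Int) (y1 : Int) (mine : List (Int × Int)) : Decidable (Pre_varen_premik x0 y0 x1 y1 mine) := by unfold Pre_varen_premik; infer_instance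
def pvWitness_varen_premik : Int × Int × Int × Int × (List (Int × Int)) := (0, 2, 3, 2, [(1, 2), (5, 0)])

def Spec_varen_premik (x0 : Int) (y0 : Int) (x1 : Int) (y1 : Int) (mine : List (Int × Int)) (out : Bool) : Prop := out = varen_premik_alt x0 y0 x1 y1 mine
instance (x0 : Int) (y0 : Int) (x1 : Int) (y1 : Int) (mine : List (Int × Int)) (out : Bool) : Decidable (Spec_varen_premik x0 y0 x1 y1 mine out) := by unfold Spec_varen_premik; infer_instance

-- ===== CLAIM (what is proved, stated in full; the proofs are below) =====
def Claim_equal_varen_premik : Prop := ∀ (x0 : Int) (y0 : Int) (x1 : Int) (y1 : Int) (mine : List (Int × Int)), Dom_varen_premik x0 y0 x1 y1 mine → Pre_varen_premik x0 y0 x1 y1 mine → Spec_varen_premik x0 y0 x1 y1 mine (varen_premik x0 y0 x1 y1 mine)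

-- ===== LEMMAS AND PROOFS =====

-- the lazy upward scan is the negated 'any' over the ascending range
theorem pvScanUp_eq (a b : Int) (key : Int → Int × Int) (mine : List (Int × Int)) :
    pvScanUp a b key mine = !(PySem.List.pyRange a b 1).any (fun x => mine.contains (key x)) := by
  fun_induction pvScanUp a b key mine with
  | case1 i h hc =>
    rw [PySem.List.pyRange_one_cons h]
    simp only [List.any_cons, hc, Bool.true_or, Bool.not_true]
  | case2 i h hc ih =>
    rw [PySem.List.pyRange_one_cons h]
    simp only [List.any_cons, Bool.eq_false_iff.mpr hc, Bool.false_or, ih]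
  | case3 i h =>
    rw [PySem.List.pyRange_one_eq_nil (by omega)]
    simp

-- the lazy downward scan is the negated 'any' over the descending range
theorem pvScanDown_eq (a b : Int) (key : Int → Int × Int) (mine : List (Int × Int)) :
    pvScanDown a b key mine = !(PySem.List.pyRange a b (-1)).any (fun x => mine.contains (key x)) := by
  fun_induction pvScanDown a b key mine with
  | case1 i h hc =>
    rw [PySem.List.pyRange_neg_one_cons h]
    simp only [List.any_cons, hc, Bool.true_or, Bool.not_true]
  | case2 i h hc ih =>
    rw [PySem.List.pyRange_neg_one_cons h]
    simp only [List.any_cons, Bool.eq_false_iff.mpr hc, Bool.false_or, ih]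
  | case3 i h =>
    rw [PySem.List.pyRange_neg_one_eq_nil (by omega)]
    simp


-- "some cell x ∈ [lo..hi] (ascending range) has (x,y) ∈ mine"  ↔  "some mine lies on the segment"
theorem range_any_eq_mine_any (lo hi y : Int) (mine : List (Int × Int)) :
    (PySem.List.pyRange lo (hi + 1) 1).any (fun x => mine.contains (x, y)) =
    mine.any (fun p => p.2 == y && decide (lo ≤ p.1) && decide (p.1 ≤ hi)) := by
  rw [Bool.eq_iff_iff]
  simp only [List.any_eq_true, PySem.List.mem_pyRange_one, List.contains_iff_mem,
    Bool.and_eq_true, beq_iff_eq, decide_eq_true_eq]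
  constructor
  · rintro ⟨x, ⟨h1, h2⟩, hm⟩
    exact ⟨(x, y), hm, ⟨rfl, h1⟩, by omega⟩
  · rintro ⟨⟨px, py⟩, hm, ⟨hy, h1⟩, h2⟩
    exact ⟨px, ⟨h1, by omega⟩, hy ▸ hm⟩

-- descending range(a, b-1, -1) covers exactly [b..a]
theorem range_any_eq_mine_any_desc (a b y : Int) (mine : List (Int × Int)) :
    (PySem.List.pyRange a (b - 1) (-1)).any (fun x => mine.contains (x, y)) =
    mine.any (fun p => p.2 == y && decide (b ≤ p.1) && decide (p.1 ≤ a)) := by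
  rw [Bool.eq_iff_iff]
  simp only [List.any_eq_true, PySem.List.mem_pyRange_neg_one, List.contains_iff_mem,
    Bool.and_eq_true, beq_iff_eq, decide_eq_true_eq]
  constructor
  · rintro ⟨x, ⟨h1, h2⟩, hm⟩
    exact ⟨(x, y), hm, ⟨rfl, by omega⟩, h2⟩
  · rintro ⟨⟨px, py⟩, hm, ⟨hy, h1⟩, h2⟩
    exact ⟨px, ⟨by omega, h2⟩, hy ▸ hm⟩

theorem not_any_eq_all_not (mine : List (Int × Int)) (f : Int × Int → Bool) :
    (!mine.any f) = mine.all (fun p => !f p) := by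
  simp [List.all_eq_not_any_not]

-- ===== VERDICT (by name: the statement is the Claim_ definition above) =====
theorem varen_premik_spec : Claim_equal_varen_premik := by
  intro x0 y0 x1 y1 mine _ hpre
  unfold Spec_varen_premik varen_premik varen_premik_alt
  rcases hpre with h | h
  · subst h
    simp only
    rcases (by omega : x0 ≤ x1 ∨ x1 < x0) with hx | hx
    · rw [if_pos (by omega : x1 ≥ x0), pvScanUp_eq, range_any_eq_mine_any, not_any_eq_all_not]
      have hmin : min x0 x1 = x0 := by omega
      have hmax : max x0 x1 = x1 := by omega
      simp [hmin, hmax]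
    · rw [if_neg (by omega : ¬ x1 ≥ x0), if_pos (by omega : x0 > x1), pvScanDown_eq,
        range_any_eq_mine_any_desc, not_any_eq_all_not]
      have hmin : min x0 x1 = x1 := by omega
      have hmax : max x0 x1 = x0 := by omega
      simp [hmin, hmax]
  · by_cases hy : y0 = y1
    · subst hy
      simp only
      rcases (by omega : x0 ≤ x1 ∨ x1 < x0) with hx | hx
      · rw [if_pos (by omega : x1 ≥ x0), pvScanUp_eq, range_any_eq_mine_any, not_any_eq_all_not]
        have hmin : min x0 x1 = x0 := by omega
        have hmax : max x0 x1 = x1 := by omega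
        simp [hmin, hmax]
      · rw [if_neg (by omega : ¬ x1 ≥ x0), if_pos (by omega : x0 > x1), pvScanDown_eq,
          range_any_eq_mine_any_desc, not_any_eq_all_not]
        have hmin : min x0 x1 = x1 := by omega
        have hmax : max x0 x1 = x0 := by omega
        simp [hmin, hmax]
    · subst h
      rw [if_neg hy, if_neg hy, if_pos rfl, if_pos rfl]
      rcases (by omega : y0 ≤ y1 ∨ y1 < y0) with hyy | hyy
      · rw [if_pos (by omega : y1 ≥ y0), pvScanUp_eq]
        have : (PySem.List.pyRange y0 (y1 + 1) 1).any (fun x => mine.contains ((fun y => (x0, y)) x)) =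
            mine.any (fun p => p.1 == x0 && decide (y0 ≤ p.2) && decide (p.2 ≤ y1)) := by
          rw [Bool.eq_iff_iff]
          simp only [List.any_eq_true, PySem.List.mem_pyRange_one, List.contains_iff_mem,
            Bool.and_eq_true, beq_iff_eq, decide_eq_true_eq]
          constructor
          · rintro ⟨y, ⟨h1, h2⟩, hm⟩
            exact ⟨(x0, y), hm, ⟨rfl, h1⟩, by omega⟩
          · rintro ⟨⟨px, py⟩, hm, ⟨hx', h1⟩, h2⟩
            exact ⟨py, ⟨h1, by omega⟩, hx' ▸ hm⟩
        rw [this, not_any_eq_all_not]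
        have hmin : min y0 y1 = y0 := by omega
        have hmax : max y0 y1 = y1 := by omega
        simp [hmin, hmax]
      · rw [if_neg (by omega : ¬ y1 ≥ y0), if_pos (by omega : y0 > y1), pvScanDown_eq]
        have : (PySem.List.pyRange y0 (y1 - 1) (-1)).any (fun x => mine.contains ((fun y => (x0, y)) x)) =
            mine.any (fun p => p.1 == x0 && decide (y1 ≤ p.2) && decide (p.2 ≤ y0)) := by
          rw [Bool.eq_iff_iff]
          simp only [List.any_eq_true, PySem.List.mem_pyRange_neg_one, List.contains_iff_mem,
            Bool.and_eq_true, beq_iff_eq, decide_eq_true_eq]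
          constructor
          · rintro ⟨y, ⟨h1, h2⟩, hm⟩
            exact ⟨(x0, y), hm, ⟨rfl, by omega⟩, h2⟩
          · rintro ⟨⟨px, py⟩, hm, ⟨hx', h1⟩, h2⟩
            exact ⟨py, ⟨by omega, h2⟩, hx' ▸ hm⟩
        rw [this, not_any_eq_all_not]
        have hmin : min y0 y1 = y1 := by omega
        have hmax : max y0 y1 = y0 := by omega
        simp [hmin, hmax]
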